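-- pv_equiv track=rewrite | github.com/niarenaw/post-canonical | src/post_canonical/query/invariants.py | _enumerate_residue_coefficients
-- ===== SOURCE A (Python) =====
-- from collections.abc import Iterable, Iterator
-- from itertools import product
--
-- def _enumerate_residue_coefficients(symbols: tuple[str, ...], modulus: int) -> Iterator[dict[str, int]]:
--     """Yield non-trivial coefficient vectors over ``Z/modulus``.
--
--     The first non-zero coordinate is forced into the smaller half of
--     the residue range so we don't double-count ``c`` and ``-c``.
--     """
--     n = len(symbols)
--     for values in product(range(modulus), repeat=n):
--         if not any(values):
--             continue
--         first_nonzero = next(v for v in values if v != 0)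
--         if first_nonzero > modulus // 2:
--             continue
--         yield dict(zip(symbols, values, strict=True))
-- ===== SOURCE B (Python) =====
-- from itertools import product
--
--
-- def _enumerate_residue_coefficients(symbols, modulus):
--     """Yield non-trivial coefficient vectors over ``Z/modulus``.
--
--     Instead of enumerating every tuple and filtering, generate directly:
--     loop over the position i of the first non-zero coordinate from n-1
--     down to 0 (more leading zeros = lexicographically smaller), put the
--     value 1..modulus//2 there, and let the tail vary freely.
--     """
--     n = len(symbols)
--     half = modulus // 2
--     residues = range(modulus)
--     leading = range(1, half + 1)
--     for i in range(n - 1, -1, -1):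
--         zeros = (0,) * i
--         for v in leading:
--             prefix = zeros + (v,)
--             for tail in product(residues, repeat=n - 1 - i):
--                 yield dict(zip(symbols, prefix + tail, strict=True))
-- ===== Notes on version B (the rewrite author's own statement) =====
-- stated objective: alternative
-- what changed: B generates exactly the admissible vectors directly (outer loop over the position of the first non-zero coordinate, descending, with the free tail enumerated by product) instead of enumerating all modulus^n tuples and filtering out the trivial and double-counted ones.
import Mathlib
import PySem

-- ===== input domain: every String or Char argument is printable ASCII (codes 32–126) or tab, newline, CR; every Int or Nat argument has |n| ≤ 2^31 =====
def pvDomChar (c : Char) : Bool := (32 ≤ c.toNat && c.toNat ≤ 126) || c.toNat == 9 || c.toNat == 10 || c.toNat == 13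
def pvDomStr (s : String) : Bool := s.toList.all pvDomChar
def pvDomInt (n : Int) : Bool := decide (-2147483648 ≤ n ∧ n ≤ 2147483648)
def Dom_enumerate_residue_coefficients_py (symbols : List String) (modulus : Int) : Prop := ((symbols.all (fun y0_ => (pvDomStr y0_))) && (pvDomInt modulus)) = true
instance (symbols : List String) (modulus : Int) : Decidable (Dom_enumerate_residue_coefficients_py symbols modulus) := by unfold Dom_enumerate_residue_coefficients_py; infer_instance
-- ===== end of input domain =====

-- B enumerates only the admissible vectors directly (first non-zero position descending),
-- instead of filtering all modulus^n tuples; same output list, including order.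
-- The Python versions are generators; the ports return the list of yielded dicts.

-- ===== PORT A =====

-- dict(zip(symbols, values, strict=True)) (lengths are always equal where it is called)
def pvDictZip (symbols : List String) (values : List Int) : List (String × Int) :=
  ((symbols.zip values).foldl (fun d kv => PySem.Dict.insert d kv.1 kv.2)
    (PySem.Dict.mk [])).items

-- itertools.product(l, repeat=n), in itertools order (leftmost coordinate slowest)
def pvProd (l : List Int) : Nat → List (List Int)
  | 0 => [[]]
  | n + 1 => l.flatMap (fun x => (pvProd l n).map (fun t => x :: t))

def enumerate_residue_coefficients_py (symbols : List String) (modulus : Int) : List (List (String × Int)) :=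
  let n := symbols.length
  (pvProd (PySem.List.pyRange 0 modulus 1) n).foldl
    (fun acc values =>
      if !(values.any (fun v => v != 0)) then acc        -- if not any(values): continue
      else
        -- next(v for v in values if v != 0); the guard above ensures find? succeeds
        let first_nonzero := ((values.find? (fun v => v != 0)).getD 0)
        if first_nonzero > PySem.Int.floordiv modulus 2 then acc
        else acc ++ [pvDictZip symbols values]) []

-- ===== PORT B =====
def enumerate_residue_coefficients_py_alt (symbols : List String) (modulus : Int) : List (List (String × Int)) :=
  let n := symbols.length
  let half := PySem.Int.floordiv modulus 2
  (PySem.List.pyRange ((n : Int) - 1) (-1) (-1)).flatMap (fun i =>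
    (PySem.List.pyRange 1 (half + 1) 1).flatMap (fun v =>
      (pvProd (PySem.List.pyRange 0 modulus 1) (n - 1 - i.toNat)).map (fun tail =>
        pvDictZip symbols (List.replicate i.toNat 0 ++ v :: tail))))

-- ===== PRECONDITION & SPEC =====
def Spec_enumerate_residue_coefficients_py (symbols : List String) (modulus : Int) (out : List (List (String × Int))) : Prop := out = enumerate_residue_coefficients_py_alt symbols modulus
instance (symbols : List String) (modulus : Int) (out : List (List (String × Int))) : Decidable (Spec_enumerate_residue_coefficients_py symbols modulus out) := by unfold Spec_enumerate_residue_coefficients_py; infer_instance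

-- ===== CLAIM (what is proved, stated in full; the proofs are below) =====
def Claim_equal_enumerate_residue_coefficients_py : Prop := ∀ (symbols : List String) (modulus : Int), Dom_enumerate_residue_coefficients_py symbols modulus → Spec_enumerate_residue_coefficients_py symbols modulus (enumerate_residue_coefficients_py symbols modulus)

-- ===== LEMMAS AND PROOFS =====

-- the filter A applies to a candidate tuple
def pvKeep (h : Int) (vs : List Int) : Bool :=
  (vs.any (fun v => v != 0)) && !(decide (((vs.find? (fun v => v != 0)).getD 0) > h))

theorem pvKeep_cons_zero (h : Int) (vs : List Int) : pvKeep h (0 :: vs) = pvKeep h vs := by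
  simp [pvKeep]

theorem pvKeep_cons_nonzero (h x : Int) (hx : x ≠ 0) (vs : List Int) :
    pvKeep h (x :: vs) = decide (x ≤ h) := by
  have hx' : (x != 0) = true := by simpa using hx
  simp [pvKeep, hx']
  rw [← decide_not]
  exact decide_eq_decide.mpr (by omega)

theorem pv_flatMap_congr {α β : Type} (l : List α) (f g : α → List β)
    (h : ∀ x ∈ l, f x = g x) : l.flatMap f = l.flatMap g := by
  simp only [List.flatMap_def]
  exact congrArg List.flatten (List.map_congr_left h)

-- the direct generator at the level of value tuples, index k counting down from the top
def pvG (m h : Int) (n i : Nat) : List (List Int) :=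
  (PySem.List.pyRange 1 (h + 1) 1).flatMap (fun v =>
    (pvProd (PySem.List.pyRange 0 m 1) (n - 1 - i)).map (fun t => List.replicate i 0 ++ v :: t))

theorem pv_main (m : Int) (n : Nat) :
    (pvProd (PySem.List.pyRange 0 m 1) n).filter (pvKeep (PySem.Int.floordiv m 2)) =
      (List.range n).flatMap (fun k => pvG m (PySem.Int.floordiv m 2) n (n - 1 - k)) := by
  set h := PySem.Int.floordiv m 2 with hh
  have hdiv : h = m / 2 := by
    rw [hh]; simp [PySem.Int.floordiv]; rw [Int.fdiv_eq_ediv]; norm_num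
  induction n with
  | zero => simp [pvProd, pvKeep]
  | succ n ih =>
    by_cases hm : m ≤ 0
    · -- range(modulus) is empty and so is 1..h
      have hR : PySem.List.pyRange 0 m 1 = [] := PySem.List.pyRange_one_eq_nil hm
      have hH : PySem.List.pyRange 1 (h + 1) 1 = [] :=
        PySem.List.pyRange_one_eq_nil (by omega)
      simp [pvProd, hR, pvG, hH]
    · rw [not_le] at hm
      have hR : PySem.List.pyRange 0 m 1 = 0 :: PySem.List.pyRange 1 m 1 :=
        PySem.List.pyRange_one_cons (by omega)
      have hsplit : PySem.List.pyRange 1 m 1 =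
          PySem.List.pyRange 1 (h + 1) 1 ++ PySem.List.pyRange (h + 1) m 1 :=
        PySem.List.pyRange_one_append 1 (h + 1) m (by omega) (by omega)
      -- unfold one product layer and distribute the filter
      have e1 : (pvProd (PySem.List.pyRange 0 m 1) (n + 1)).filter (pvKeep h) =
          ((pvProd (PySem.List.pyRange 0 m 1) n).filter (pvKeep h)).map (fun t => 0 :: t) ++
            (PySem.List.pyRange 1 m 1).flatMap (fun x =>
              if decide (x ≤ h) ∧ x ≠ 0 then
                (pvProd (PySem.List.pyRange 0 m 1) n).map (fun t => x :: t)
              else []) := by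
        rw [show pvProd (PySem.List.pyRange 0 m 1) (n + 1) =
              (PySem.List.pyRange 0 m 1).flatMap
                (fun x => (pvProd (PySem.List.pyRange 0 m 1) n).map (fun t => x :: t)) from rfl]
        rw [hR]
        simp only [List.flatMap_cons, List.filter_append]
        congr 1
        · rw [List.filter_map]
          exact congrArg (List.map (fun t => (0 : Int) :: t))
            (List.filter_congr (fun t _ => by simpa [Function.comp] using pvKeep_cons_zero h t))
        · rw [List.filter_flatMap]
          apply pv_flatMap_congr
          intro x hxmem
          have hx0 : x ≠ 0 := by
            have := (PySem.List.mem_pyRange_one).1 hxmem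
            omega
          rw [List.filter_map]
          have : pvKeep h ∘ (fun t => x :: t) = fun _ => decide (x ≤ h) := by
            funext t
            simpa [Function.comp] using pvKeep_cons_nonzero h x hx0 t
          rw [this]
          by_cases hxh : x ≤ h <;> simp [hxh, hx0]
      rw [e1, ih, hsplit, List.flatMap_append]
      -- the > h part contributes nothing
      have e2 : (PySem.List.pyRange (h + 1) m 1).flatMap (fun x =>
          if decide (x ≤ h) ∧ x ≠ 0 then
            (pvProd (PySem.List.pyRange 0 m 1) n).map (fun t => x :: t)
          else []) = [] := by
        rw [pv_flatMap_congr _ _ (fun _ => ([] : List (List Int)))]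
        · simp
        · intro x hxmem
          have := (PySem.List.mem_pyRange_one).1 hxmem
          have : ¬ (x ≤ h) := by omega
          simp [this]
      -- the 1..h part is exactly pvG … 0
      have e3 : (PySem.List.pyRange 1 (h + 1) 1).flatMap (fun x =>
          if decide (x ≤ h) ∧ x ≠ 0 then
            (pvProd (PySem.List.pyRange 0 m 1) n).map (fun t => x :: t)
          else []) = pvG m h (n + 1) 0 := by
        unfold pvG
        apply pv_flatMap_congr
        intro x hxmem
        have := (PySem.List.mem_pyRange_one).1 hxmem
        have hx0 : x ≠ 0 := by omega
        have hxh : x ≤ h := by omega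
        simp [hxh, hx0]
      rw [e2, e3]
      -- prefixing a zero bumps the first-non-zero position by one
      have e4 : ((List.range n).flatMap (fun k => pvG m h n (n - 1 - k))).map (fun t => 0 :: t) =
          (List.range n).flatMap (fun k => pvG m h (n + 1) (n + 1 - 1 - k)) := by
        rw [List.map_flatMap]
        apply pv_flatMap_congr
        intro k hk
        have hkn : k < n := List.mem_range.1 hk
        show (pvG m h n (n - 1 - k)).map (fun t => 0 :: t) = pvG m h (n + 1) (n - k)
        unfold pvG
        rw [List.map_flatMap]
        apply pv_flatMap_congr
        intro v _
        rw [List.map_map]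
        have hidx : n - k = (n - 1 - k) + 1 := by omega
        have hdep : n + 1 - 1 - (n - 1 - k + 1) = n - 1 - (n - 1 - k) := by omega
        rw [hidx, hdep]
        apply List.map_congr_left
        intro t _
        simp [List.replicate_succ, Function.comp]
      rw [e4]
      rw [List.range_succ, List.flatMap_append]
      simp

-- ===== VERDICT (by name: the statement is the Claim_ definition above) =====
theorem enumerate_residue_coefficients_py_spec : Claim_equal_enumerate_residue_coefficients_py := by
  intro symbols modulus _
  show _ = _
  unfold enumerate_residue_coefficients_py enumerate_residue_coefficients_py_alt
  simp only []
  set h := PySem.Int.floordiv modulus 2 with hh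
  set n := symbols.length with hn
  -- turn A's loop into filter + map
  have hfun : (fun (acc : List (List (String × Int))) (values : List Int) =>
      if !(values.any (fun v => v != 0)) then acc
      else
        if ((values.find? (fun v => v != 0)).getD 0) > h then acc
        else acc ++ [pvDictZip symbols values]) =
      (fun acc values => if pvKeep h values then acc ++ [pvDictZip symbols values] else acc) := by
    funext acc values
    unfold pvKeep
    by_cases h1 : values.any (fun v => v != 0)
    · by_cases h2 : ((values.find? (fun v => v != 0)).getD 0) > h
      · simp [h1, h2]
      · simp [h1, h2]
    · simp [h1]
  rw [hfun, PySem.List.foldl_append_if]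
  rw [pv_main modulus n]
  -- push the dict construction inside B's nested structure
  rw [List.map_flatMap]
  -- B's index list is (range n) read top-down
  have hrev : PySem.List.pyRange ((n : Int) - 1) (-1) (-1) =
      (List.range n).map (fun k : Nat => ((n : Int) - 1) - (k : Int)) := by
    rw [PySem.List.pyRange_neg_one]
    have hn' : (((n : Int) - 1) - (-1)).toNat = n := by omega
    rw [hn']
  rw [hrev, List.flatMap_map]
  simp only [List.nil_append]
  apply pv_flatMap_congr
  intro k hk
  have hkn : k < n := List.mem_range.1 hk
  have htn : ((n : Int) - 1 - k).toNat = n - 1 - k := by omega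
  rw [htn]
  unfold pvG
  rw [List.map_flatMap]
  apply pv_flatMap_congr
  intro v _
  rw [List.map_map]
  rfl
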